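-- pv_equiv track=rewrite | github.com/kristiancharb/DS-and-Algos | bit-manipulation.py | longest_sequence_ones
-- ===== SOURCE A (Python) =====
-- def longest_sequence_ones(n):
--     curr = 0
--     prev = 0
--     max_len = 0
--     for i in range(32):
--         if n & (1 << i) != 0:
--             curr += 1
--         else:
--             prev = curr
--             curr = 0
--
--         max_len = max(curr + prev + 1, max_len)
--
--     return max_len
-- ===== SOURCE B (Python) =====
-- def longest_sequence_ones(n):
--     # Run-length decomposition: encode bits 0..31 as maximal runs, then scan the
--     # runs: every ones-run can grow by one flipped bit, and two ones-runs
--     # separated by a single zero join when that zero is flipped.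
--     cur_bit = n & 1 != 0
--     cur_len = 1
--     runs = []
--     for i in range(1, 32):
--         b = n & (1 << i) != 0
--         if b == cur_bit:
--             cur_len += 1
--         else:
--             runs.append((cur_bit, cur_len))
--             cur_bit = b
--             cur_len = 1
--     runs.append((cur_bit, cur_len))
--     best = 1
--     while runs:
--         is_one, ln = runs[0]
--         rest = runs[1:]
--         if is_one:
--             best = max(best, ln + 1)
--             if len(rest) >= 2 and rest[0][1] == 1:
--                 best = max(best, ln + rest[1][1] + 1)
--         runs = rest
--     return best
-- ===== Notes on version B (the rewrite author's own statement) =====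
-- stated objective: alternative
-- what changed: B replaces A's single pass with curr/prev run counters by a two-phase run-length decomposition: it first builds the list of maximal same-bit runs over bits 0..31, then scans the run list, taking one more than the length of each ones-run and the joined length (left run plus right run plus the flipped zero) for ones-runs separated by a single zero.
import Mathlib
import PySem

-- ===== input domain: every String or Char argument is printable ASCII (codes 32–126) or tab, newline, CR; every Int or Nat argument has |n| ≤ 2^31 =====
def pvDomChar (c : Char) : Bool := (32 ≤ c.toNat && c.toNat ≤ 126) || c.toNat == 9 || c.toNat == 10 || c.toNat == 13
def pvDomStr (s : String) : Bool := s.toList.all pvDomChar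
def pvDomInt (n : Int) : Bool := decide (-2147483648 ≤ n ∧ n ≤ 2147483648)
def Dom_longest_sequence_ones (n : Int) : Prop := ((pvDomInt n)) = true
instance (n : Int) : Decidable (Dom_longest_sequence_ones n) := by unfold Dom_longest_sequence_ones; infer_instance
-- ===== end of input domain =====

-- B re-implements A by run-length decomposition of bits 0..31 (build maximal
-- runs, then scan runs for grow-by-one and join-across-a-single-zero
-- candidates) instead of A's single pass with curr/prev counters; same cost,
-- different decomposition (objective: alternative).

-- ===== PORT A =====
def longest_sequence_ones (n : Int) : Int :=
  (((List.range 32).foldl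
      (fun (st : Int × Int × Int) (i : Nat) =>
        let curr := st.1
        let prev := st.2.1
        let max_len := st.2.2
        let cp : Int × Int :=
          if PySem.Int.band n ((1 : Int) <<< i) ≠ 0 then (curr + 1, prev)
          else ((0 : Int), curr)
        (cp.1, cp.2, max (cp.1 + cp.2 + 1) max_len))
      ((0 : Int), (0 : Int), (0 : Int))).2.2)

-- ===== PORT B =====
-- second loop of Source B: while runs: look at runs[0], with 2-run lookahead into rest
def scanRuns : List (Bool × Int) → Int → Int
  | [], best => best
  | (is_one, ln) :: rest, best =>
    if is_one then
      let best1 := max best (ln + 1)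
      let best2 :=
        match rest with
        | (_, g) :: (_, r) :: _ => if g = 1 then max best1 (ln + r + 1) else best1
        | _ => best1
      scanRuns rest best2
    else scanRuns rest best

def longest_sequence_ones_alt (n : Int) : Int :=
  -- first loop of Source B: build the run-length encoding of bits 0..31
  let st := (List.range' 1 31).foldl
      (fun (st : Bool × Int × List (Bool × Int)) (i : Nat) =>
        let b : Bool := PySem.Int.band n ((1 : Int) <<< i) != 0
        if b == st.1 then (st.1, st.2.1 + 1, st.2.2)
        else (b, (1 : Int), st.2.2 ++ [(st.1, st.2.1)]))
      ((PySem.Int.band n 1 != 0 : Bool), (1 : Int), ([] : List (Bool × Int)))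
  scanRuns (st.2.2 ++ [(st.1, st.2.1)]) 1

-- ===== PRECONDITION & SPEC =====
def Spec_longest_sequence_ones (n : Int) (out : Int) : Prop := out = longest_sequence_ones_alt n
instance (n : Int) (out : Int) : Decidable (Spec_longest_sequence_ones n out) := by unfold Spec_longest_sequence_ones; infer_instance

-- ===== CLAIM (what is proved, stated in full; the proofs are below) =====
def Claim_equal_longest_sequence_ones : Prop := ∀ (n : Int), Dom_longest_sequence_ones n → Spec_longest_sequence_ones n (longest_sequence_ones n)

-- ===== LEMMAS AND PROOFS =====

-- the i-th bit test both Pythons perform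
def pvBit (n : Int) (i : Nat) : Bool := PySem.Int.band n ((1 : Int) <<< i) != 0

-- A's loop body, abstracted over the bit value
def stepA (st : Int × Int × Int) (b : Bool) : Int × Int × Int :=
  let cp : Int × Int := if b then (st.1 + 1, st.2.1) else ((0 : Int), st.1)
  (cp.1, cp.2, max (cp.1 + cp.2 + 1) st.2.2)

-- B's run-builder body, abstracted over the bit value
def pushBit (st : Bool × Int × List (Bool × Int)) (b : Bool) : Bool × Int × List (Bool × Int) :=
  if b == st.1 then (st.1, st.2.1 + 1, st.2.2)
  else (b, (1 : Int), st.2.2 ++ [(st.1, st.2.1)])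

-- well-formed run lists: positive lengths, alternating bits
def Alt : List (Bool × Int) → Prop
  | [] => True
  | (b, l) :: rest =>
    1 ≤ l ∧ (match rest with | [] => True | (c, _) :: _ => c = !b) ∧ Alt rest

def flattenRuns (rl : List (Bool × Int)) : List Bool :=
  rl.flatMap (fun r => List.replicate r.2.toNat r.1)

-- what A's loop computes over a run list, given incoming joinable prev p and running max m
def M : List (Bool × Int) → Int → Int → Int
  | [], _, m => m
  | (false, _) :: rest, _, m => M rest 0 (max m 1)
  | [(true, k)], p, m => max m (k + p + 1)
  | (true, k) :: (false, g) :: rest, p, m =>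
      M rest (if g = 1 then k else 0) (max m (k + p + 1))
  | (true, _) :: (true, _) :: rest, _, m => M rest 0 m  -- unreachable under Alt

def bonus : List (Bool × Int) → Int → Int
  | (true, k) :: _, p => k + p + 1
  | _, _ => 0

theorem flatten_append (rs ts : List (Bool × Int)) :
    flattenRuns (rs ++ ts) = flattenRuns rs ++ flattenRuns ts := by
  simp [flattenRuns]

theorem foldl_stepA_true (k : Nat) : ∀ (c p m : Int), 0 ≤ c →
    List.foldl stepA (c, p, m) (List.replicate k true) =
      (c + k, p, if k = 0 then m else max m (c + k + p + 1)) := by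
  induction k with
  | zero => intro c p m _; simp
  | succ k ih =>
    intro c p m hc
    rw [List.replicate_succ]
    simp only [List.foldl_cons, stepA, ite_true]
    rw [ih (c+1) p (max (c + 1 + p + 1) m) (by omega)]
    refine Prod.ext (by push_cast; ring) (Prod.ext rfl ?_)
    simp only
    cases k with
    | zero => simp; omega
    | succ k => simp only [Nat.succ_ne_zero, reduceIte]; push_cast; omega

theorem foldl_stepA_false (g : Nat) : ∀ (c p m : Int), 0 ≤ c → 1 ≤ g →
    List.foldl stepA (c, p, m) (List.replicate g false) =
      (0, if g = 1 then c else 0, max m (c + 1)) := by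
  induction g with
  | zero => intro c p m _ h; omega
  | succ g ih =>
    intro c p m hc _
    rw [List.replicate_succ]
    simp only [List.foldl_cons, stepA, Bool.false_eq_true, ite_false]
    cases g with
    | zero => simp; omega
    | succ g =>
      rw [ih 0 c (max (0 + c + 1) m) (by omega) (by omega)]
      refine Prod.ext rfl (Prod.ext ?_ ?_) <;> simp <;> omega

theorem alt_pos {rl : List (Bool × Int)} (h : Alt rl) : ∀ x ∈ rl, 1 ≤ x.2 := by
  induction rl with
  | nil => simp
  | cons hd tl ih =>
    obtain ⟨b, l⟩ := hd
    obtain ⟨h1, _, h3⟩ := h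
    intro x hx
    rcases List.mem_cons.mp hx with h | h
    · subst h; exact h1
    · exact ih h3 x h

theorem alt_snoc_bump (rs : List (Bool × Int)) (b : Bool) (l : Int) (hl : 1 ≤ l)
    (h : Alt (rs ++ [(b, l)])) : Alt (rs ++ [(b, l + 1)]) := by
  induction rs with
  | nil => simpa [Alt] using (by omega : 1 ≤ l + 1)
  | cons hd tl ih =>
    obtain ⟨c, m⟩ := hd
    obtain ⟨h1, h2, h3⟩ := h
    refine ⟨h1, ?_, ih h3⟩
    cases tl <;> simpa using h2

theorem alt_snoc_new (rs : List (Bool × Int)) (b : Bool) (l : Int)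
    (h : Alt (rs ++ [(b, l)])) : Alt ((rs ++ [(b, l)]) ++ [(!b, 1)]) := by
  induction rs with
  | nil =>
    obtain ⟨h1, -, -⟩ := h
    exact ⟨h1, rfl, by omega, trivial, trivial⟩
  | cons hd tl ih =>
    obtain ⟨c, m⟩ := hd
    obtain ⟨h1, h2, h3⟩ := h
    refine ⟨h1, ?_, ih h3⟩
    cases tl <;> simpa using h2

theorem build_inv (bs : List Bool) : ∀ (cb : Bool) (cl : Int) (rs : List (Bool × Int)),
    Alt (rs ++ [(cb, cl)]) →
    Alt ((List.foldl pushBit (cb, cl, rs) bs).2.2 ++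
          [((List.foldl pushBit (cb, cl, rs) bs).1, (List.foldl pushBit (cb, cl, rs) bs).2.1)]) ∧
    flattenRuns ((List.foldl pushBit (cb, cl, rs) bs).2.2 ++
          [((List.foldl pushBit (cb, cl, rs) bs).1, (List.foldl pushBit (cb, cl, rs) bs).2.1)]) =
      flattenRuns (rs ++ [(cb, cl)]) ++ bs := by
  induction bs with
  | nil => intro cb cl rs h; exact ⟨h, by simp⟩
  | cons b bs ih =>
    intro cb cl rs h
    have hcl : 1 ≤ cl := alt_pos h (cb, cl) (by simp) 
    by_cases hb : b = cb
    · subst hb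
      rw [List.foldl_cons, pushBit, if_pos (by simp)]
      have h' : Alt (rs ++ [(b, cl + 1)]) := alt_snoc_bump rs b cl hcl h
      obtain ⟨a1, a2⟩ := ih b (cl + 1) rs h'
      refine ⟨a1, ?_⟩
      rw [a2]
      have : flattenRuns (rs ++ [(b, cl + 1)]) = flattenRuns (rs ++ [(b, cl)]) ++ [b] := by
        rw [flatten_append, flatten_append]
        have : (cl + 1).toNat = cl.toNat + 1 := by omega
        simp [flattenRuns, this, List.replicate_succ']
      rw [this]; simp
    · have hb' : b = !cb := by cases b <;> cases cb <;> simp_all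
      rw [List.foldl_cons, pushBit, if_neg (by simp [hb])]
      have h' : Alt ((rs ++ [(cb, cl)]) ++ [(b, 1)]) := hb' ▸ alt_snoc_new rs cb cl h
      obtain ⟨a1, a2⟩ := ih b 1 (rs ++ [(cb, cl)]) h'
      refine ⟨a1, ?_⟩
      rw [a2, flatten_append]
      simp [flattenRuns]

theorem foldl_stepA_flatten (N : Nat) : ∀ (rl : List (Bool × Int)), rl.length ≤ N →
    Alt rl → ∀ (p m : Int), 0 ≤ p →
    (List.foldl stepA (0, p, m) (flattenRuns rl)).2.2 = M rl p m := by
  induction N with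
  | zero =>
    intro rl hlen _ p m _
    have h0 : rl = [] := List.length_eq_zero_iff.mp (by omega)
    subst h0; rfl
  | succ N ih =>
    intro rl hlen halt p m hp
    match rl with
    | [] => rfl
    | (false, g) :: rest =>
      obtain ⟨hg, _, h3⟩ := halt
      have : flattenRuns ((false, g) :: rest) = List.replicate g.toNat false ++ flattenRuns rest := by
        simp [flattenRuns]
      rw [this, List.foldl_append,
        foldl_stepA_false g.toNat 0 p m (by omega) (by omega)]
      have hone : max m (0 + 1) = max m 1 := by norm_num
      have hz : (if g.toNat = 1 then (0:Int) else 0) = 0 := by simp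
      rw [hz, hone, ih rest (by simpa using Nat.lt_succ_iff.mp (by simpa using hlen)) h3 0 (max m 1) le_rfl]
      rfl
    | (true, k) :: rest =>
      obtain ⟨hk, h2, h3⟩ := halt
      have hfl : flattenRuns ((true, k) :: rest) = List.replicate k.toNat true ++ flattenRuns rest := by
        simp [flattenRuns]
      rw [hfl, List.foldl_append, foldl_stepA_true k.toNat 0 p m le_rfl]
      have hk0 : (k.toNat : Int) = k := by omega
      rw [if_neg (by omega), hk0]
      simp only [zero_add]
      match rest, h2, h3 with
      | [], _, _ => simp [flattenRuns, M]
      | (c, g) :: rest', h2, h3 =>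
        have hc : c = false := by simpa using h2
        subst hc
        obtain ⟨hg, _, h3'⟩ := h3
        have hfl2 : flattenRuns ((false, g) :: rest') = List.replicate g.toNat false ++ flattenRuns rest' := by
          simp [flattenRuns]
        rw [hfl2, List.foldl_append,
          foldl_stepA_false g.toNat k p (max m (k + p + 1)) (by omega) (by omega)]
        have habs : max (max m (k + p + 1)) (k + 1) = max m (k + p + 1) := by omega
        rw [habs]
        have hif : (if g.toNat = 1 then k else 0) = (if g = 1 then k else 0) := by
          by_cases h : g = 1 <;> simp [h] <;> omega
        rw [hif]
        have hlen' : rest'.length ≤ N := by simp at hlen; omega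
        rw [ih rest' hlen' h3' (if g = 1 then k else 0) (max m (k + p + 1))
          (by by_cases h : g = 1 <;> simp [h] <;> omega)]
        simp [M]

theorem scanRuns_cons_true (k : Int) (t : List (Bool × Int)) (b : Int) :
    scanRuns ((true, k) :: t) b = scanRuns t
      (match t with
       | (_, g) :: (_, r) :: _ => if g = 1 then max (max b (k + 1)) (k + r + 1) else max b (k + 1)
       | _ => max b (k + 1)) := rfl

theorem scanRuns_cons_false (g : Int) (t : List (Bool × Int)) (b : Int) :
    scanRuns ((false, g) :: t) b = scanRuns t b := rfl

theorem scanRuns_true_single (k b : Int) :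
    scanRuns [(true, k)] b = max b (k + 1) := rfl

theorem scanRuns_true_join (k g r : Int) (x2 : Bool) (t : List (Bool × Int)) (b : Int) :
    scanRuns ((true, k) :: (false, g) :: (x2, r) :: t) b =
      scanRuns ((x2, r) :: t)
        (if g = 1 then max (max b (k + 1)) (k + r + 1) else max b (k + 1)) := rfl

theorem scanRuns_absorb (k : Int) (t : List (Bool × Int)) (b : Int) :
    scanRuns ((true, k) :: t) (max b (k + 1)) = scanRuns ((true, k) :: t) b := by
  rw [scanRuns_cons_true, scanRuns_cons_true]
  congr 1
  match t with
  | [] => dsimp only; omega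
  | [(b1, g)] => dsimp only; omega
  | (b1, g) :: (b2, r) :: t' =>
    dsimp only
    by_cases hg : g = 1 <;> simp only [hg, reduceIte] <;> omega

theorem M_eq_scanRuns (N : Nat) : ∀ (rl : List (Bool × Int)), rl.length ≤ N →
    Alt rl → ∀ (p m : Int), 0 ≤ p → 1 ≤ m →
    M rl p m = scanRuns rl (max m (bonus rl p)) := by
  induction N with
  | zero =>
    intro rl hlen _ p m _ hm
    have h0 : rl = [] := List.length_eq_zero_iff.mp (by omega)
    subst h0
    simp [M, scanRuns, bonus]; omega
  | succ N ih =>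
    intro rl hlen halt p m hp hm
    match rl with
    | [] => simp [M, scanRuns, bonus]; omega
    | (false, g) :: rest =>
      obtain ⟨hg, h2, h3⟩ := halt
      have hm1 : max m 1 = m := by omega
      rw [show M ((false, g) :: rest) p m = M rest 0 (max m 1) from rfl, hm1]
      have hb0 : max m (bonus ((false, g) :: rest) p) = m := by dsimp only [bonus]; omega
      rw [scanRuns_cons_false, hb0, ih rest (by simp at hlen; omega) h3 0 m le_rfl hm]
      match rest, h2, h3 with
      | [], _, _ => dsimp only [scanRuns, bonus]; omega
      | (c, r) :: rest', h2, h3 =>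
        have hc : c = true := by simpa using h2
        subst hc
        have : max m (bonus ((true, r) :: rest') 0) = max m (r + 1) := by dsimp only [bonus]; ring_nf
        rw [this, scanRuns_absorb]
    | (true, k) :: rest =>
      obtain ⟨hk, h2, h3⟩ := halt
      match rest, h2, h3 with
      | [], _, _ =>
        simp [M, scanRuns, bonus]; omega
      | (c, g) :: rest', h2, h3 =>
        have hc : c = false := by simpa using h2
        subst hc
        obtain ⟨hg, h2', h3'⟩ := h3
        have hM : M ((true, k) :: (false, g) :: rest') p m
            = M rest' (if g = 1 then k else 0) (max m (k + p + 1)) := rfl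
        have hm' : (1:Int) ≤ max m (k + p + 1) := by omega
        have hp' : (0:Int) ≤ if g = 1 then k else 0 := by by_cases h : g = 1 <;> simp [h] <;> omega
        rw [hM, ih rest' (by simp at hlen; omega) h3' _ _ hp' hm']
        -- now unfold scanRuns on the RHS twice
        match rest', h2', h3' with
        | [], _, _ =>
          simp [scanRuns, bonus]; omega
        | (c2, r) :: rest'', h2', h3' =>
          have hc2 : c2 = true := by simpa using h2'
          subst hc2
          have hr : 1 ≤ r := (alt_pos h3' (true, r) (by simp))
          rw [scanRuns_true_join]
          dsimp only [bonus]
          by_cases hg1 : g = 1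
          · subst hg1
            simp only [reduceIte]
            congr 1
            omega
          · rw [if_neg hg1, if_neg hg1]
            have lhs : max (max m (k + p + 1)) (r + 0 + 1) = max (max m (k + p + 1)) (r + 1) := by omega
            rw [lhs, scanRuns_absorb]
            congr 1
            omega

theorem scanRuns_true_pair (k g b : Int) :
    scanRuns [(true, k), (false, g)] b = max b (k + 1) := rfl

theorem main_runs (rl : List (Bool × Int)) (h : Alt rl) (hne : rl ≠ []) :
    (List.foldl stepA (0, 0, 0) (flattenRuns rl)).2.2 = scanRuns rl 1 := by
  rw [foldl_stepA_flatten rl.length rl le_rfl h 0 0 le_rfl]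
  match rl, h, hne with
  | (false, g) :: rest, h, _ =>
    obtain ⟨hg, h2, h3⟩ := h
    have hM : M ((false, g) :: rest) 0 0 = M rest 0 1 := by
      show M rest 0 (max 0 1) = M rest 0 1
      norm_num
    rw [hM, scanRuns_cons_false,
      M_eq_scanRuns rest.length rest le_rfl h3 0 1 le_rfl le_rfl]
    match rest, h2, h3 with
    | [], _, _ => rfl
    | (c, r) :: rest', h2, h3 =>
      have hc : c = true := by simpa using h2
      subst hc
      have : max 1 (bonus ((true, r) :: rest') 0) = max 1 (r + 1) := by
        dsimp only [bonus]; omega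
      rw [this, scanRuns_absorb]
  | (true, k) :: rest, h, _ =>
    obtain ⟨hk, h2, h3⟩ := h
    match rest, h2, h3 with
    | [], _, _ =>
      show max 0 (k + 0 + 1) = scanRuns [(true, k)] 1
      rw [scanRuns_true_single]
      omega
    | (c, g) :: rest', h2, h3 =>
      have hc : c = false := by simpa using h2
      subst hc
      obtain ⟨hg, h2', h3'⟩ := h3
      have hM : M ((true, k) :: (false, g) :: rest') 0 0
          = M rest' (if g = 1 then k else 0) (k + 1) := by
        show M rest' (if g = 1 then k else 0) (max 0 (k + 0 + 1))
          = M rest' (if g = 1 then k else 0) (k + 1)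
        have : max 0 (k + 0 + 1) = k + 1 := by omega
        rw [this]
      rw [hM]
      match rest', h2', h3' with
      | [], _, _ =>
        rw [scanRuns_true_pair]
        show (k + 1 : Int) = max 1 (k + 1)
        omega
      | (c2, r) :: rest'', h2', h3' =>
        have hc2 : c2 = true := by simpa using h2'
        subst hc2
        have hr : 1 ≤ r := (alt_pos h3' (true, r) (by simp))
        have hp' : (0:Int) ≤ if g = 1 then k else 0 := by
          by_cases hx : g = 1 <;> simp [hx] <;> omega
        rw [M_eq_scanRuns ((true, r) :: rest'').length ((true, r) :: rest'') le_rfl h3' _ _ hp' (by omega),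
          scanRuns_true_join]
        dsimp only [bonus]
        by_cases hg1 : g = 1
        · subst hg1
          simp only [reduceIte]
          congr 1
          omega
        · rw [if_neg hg1, if_neg hg1]
          have lhs : max (k + 1) (r + 0 + 1) = max (k + 1) (r + 1) := by omega
          rw [lhs, scanRuns_absorb]
          congr 1
          omega

theorem bits_head (n : Int) :
    (List.range 32).map (pvBit n) = pvBit n 0 :: (List.range' 1 31).map (pvBit n) := by
  rw [List.range_eq_range']
  rfl

theorem portA_bits (n : Int) :
    longest_sequence_ones n
      = (List.foldl stepA (0, 0, 0) ((List.range 32).map (pvBit n))).2.2 := by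
  unfold longest_sequence_ones
  rw [List.foldl_map]
  apply congrArg (fun f => (List.foldl f ((0 : Int), (0 : Int), (0 : Int)) (List.range 32)).2.2)
  funext st i
  simp only [stepA, pvBit, bne_iff_ne, ne_eq]

theorem portB_runs (n : Int) :
    longest_sequence_ones_alt n
      = scanRuns
          ((List.foldl pushBit (pvBit n 0, 1, []) ((List.range' 1 31).map (pvBit n))).2.2 ++
            [((List.foldl pushBit (pvBit n 0, 1, []) ((List.range' 1 31).map (pvBit n))).1,
              (List.foldl pushBit (pvBit n 0, 1, []) ((List.range' 1 31).map (pvBit n))).2.1)]) 1 := by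
  unfold longest_sequence_ones_alt
  rw [List.foldl_map]
  rfl

-- ===== VERDICT (by name: the statement is the Claim_ definition above) =====
theorem longest_sequence_ones_spec : Claim_equal_longest_sequence_ones := by
  unfold Claim_equal_longest_sequence_ones
  intro n _
  unfold Spec_longest_sequence_ones
  rw [portA_bits, portB_runs, bits_head]
  set bs := (List.range' 1 31).map (pvBit n) with hbs
  have h0 : Alt ([] ++ [(pvBit n 0, (1 : Int))]) := ⟨le_rfl, trivial, trivial⟩
  obtain ⟨ha, hf⟩ := build_inv bs (pvBit n 0) 1 [] h0
  set st := List.foldl pushBit (pvBit n 0, 1, ([] : List (Bool × Int))) bs with hst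
  have hflat : flattenRuns (st.2.2 ++ [(st.1, st.2.1)]) = pvBit n 0 :: bs := by
    rw [hf]
    simp [flattenRuns]
  rw [← hflat]
  exact main_runs _ ha (by simp)
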